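-- pv_equiv track=rewrite | github.com/aziznal/luigi-sacco-and-route-encryption | logic/route_encryption.py | apply_reverse_e4
-- ===== SOURCE A (Python) =====
-- from typing import List, Tuple
--
-- def get_matrix_diags(matrix: List[List[str]]) -> List[Tuple[int, int]]:
--     """
--     Returns a list of all the diagonals for the given matrix appropriate to the
--     e4 route. The diagonals are returned in order and can be traversed to form
--     the message or decrypt an e4 matrix.
--     """
--     row_count, col_count = len(matrix), len(matrix[0])
--
--     diags = []
--     # Every element in the last column is the start of a diagonal
--     # List is reversed to keep order of diagonals
--     for i in list(range(row_count))[::-1]: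
--         diags.append((i, col_count-1))
--
--     # Every element in the first row is also the start of a diagonal
--     for j in list(range(col_count))[::-1]:
--         if (0, j) not in diags:
--             diags.append((0, j))
--
--     return diags
--
-- def apply_reverse_e4(matrix: List[List[str]]) -> str:
--     """
--     Applies reverse E4 route algorithm to extract message from given matrix
--     """
--     row_count, col_count = len(matrix), len(matrix[0])
--
--     message = ""
--
--     diags = get_matrix_diags(matrix)
--
--     for diag_head in diags:
--
--         i, j = diag_head
--
--         while i <= row_count-1 and j >= 0:
--             message += matrix[i][j]
--             i += 1
--             j -= 1
--
--     return message
-- ===== SOURCE B (Python) =====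
-- from typing import List
--
-- def apply_reverse_e4(matrix: List[List[str]]) -> str:
--     """
--     Applies reverse E4 route algorithm to extract message from given matrix
--     (anti-diagonal buckets, concatenated from the highest diagonal down).
--     """
--     row_count, col_count = len(matrix), len(matrix[0])
--
--     buckets = [[] for _ in range(row_count + col_count - 1)]
--     for i in range(row_count):
--         for j in range(col_count):
--             buckets[i + j].append(matrix[i][j])
--
--     return "".join(
--         cell
--         for s in range(row_count + col_count - 2, -1, -1)
--         for cell in buckets[s]
--     )
-- ===== Notes on version B (the rewrite author's own statement) =====
-- stated objective: idiomatic
-- what changed: Replaces the computed diagonal-head list (with its 'not in' dedup scan) and the per-head while-walk with string += by a single row-major pass that buckets cells by anti-diagonal index i+j, concatenated via ''.join from the highest diagonal down.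
import Mathlib
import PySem

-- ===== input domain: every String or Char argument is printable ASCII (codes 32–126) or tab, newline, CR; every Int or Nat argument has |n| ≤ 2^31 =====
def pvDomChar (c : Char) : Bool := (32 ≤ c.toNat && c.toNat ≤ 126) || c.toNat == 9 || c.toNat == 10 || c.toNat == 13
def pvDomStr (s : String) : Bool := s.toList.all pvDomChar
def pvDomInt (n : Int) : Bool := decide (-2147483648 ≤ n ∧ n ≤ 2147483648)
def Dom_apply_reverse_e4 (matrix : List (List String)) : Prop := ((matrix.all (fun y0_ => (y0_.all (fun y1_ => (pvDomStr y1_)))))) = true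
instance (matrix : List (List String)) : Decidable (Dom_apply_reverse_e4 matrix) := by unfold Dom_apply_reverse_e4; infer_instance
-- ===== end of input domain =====

-- B replaces A's diagonal-head list (built with a 'not in' dedup scan) and per-head
-- while-walk with string += by one row-major pass bucketing cells by anti-diagonal
-- index i+j, joined from the highest diagonal down (idiomatic; same exact output).


-- ===== PORT A =====
-- matrix[i][j] with Int indices (the defaults are only reachable outside Pre_)
def pvCellI (matrix : List (List String)) (i j : Int) : String :=
  PySem.List.pyGetD (PySem.List.pyGetD matrix i []) j ""

-- helper get_matrix_diags, transliterated
def get_matrix_diags (matrix : List (List String)) : List (Int × Int) :=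
  let row_count : Int := matrix.length
  let col_count : Int := (PySem.List.pyGetD matrix 0 ([] : List String)).length
  let diags : List (Int × Int) :=
    ((PySem.List.slice? (PySem.List.pyRange 0 row_count 1) none none (-1)).getD []).foldl
      (fun acc i => acc ++ [(i, col_count - 1)]) []
  ((PySem.List.slice? (PySem.List.pyRange 0 col_count 1) none none (-1)).getD []).foldl
    (fun acc j => if ((0 : Int), j) ∈ acc then acc else acc ++ [((0 : Int), j)]) diags

-- the inner while loop of apply_reverse_e4
def pvWalk (matrix : List (List String)) (row_count : Int) (i j : Int) (message : String) : String :=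
  if _h : i ≤ row_count - 1 ∧ 0 ≤ j then
    pvWalk matrix row_count (i + 1) (j - 1) (message ++ pvCellI matrix i j)
  else message
termination_by (j + 1).toNat
decreasing_by omega

def apply_reverse_e4 (matrix : List (List String)) : String :=
  let row_count : Int := matrix.length
  (get_matrix_diags matrix).foldl
    (fun message diag_head => pvWalk matrix row_count diag_head.1 diag_head.2 message) ""


-- ===== PORT B =====
-- matrix[i][j] with Nat indices (the defaults are only reachable outside Pre_)
def pvCell (matrix : List (List String)) (i j : Nat) : String :=
  (matrix.getD i []).getD j ""
def apply_reverse_e4_alt (matrix : List (List String)) : String :=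
  let row_count : Nat := matrix.length
  let col_count : Nat := (matrix.headD []).length
  let buckets : List (List String) :=
    (List.range row_count).foldl
      (fun bs i =>
        (List.range col_count).foldl
          (fun bs j => bs.set (i + j) (bs.getD (i + j) [] ++ [pvCell matrix i j])) bs)
      (List.replicate (row_count + col_count - 1) [])
  PySem.Str.join "" (((List.range (row_count + col_count - 1)).reverse).flatMap
    (fun s => buckets.getD s []))


-- ===== PRECONDITION & SPEC =====
-- Pre_ excludes exactly the inputs on which the Python A raises IndexError:
-- the empty matrix (len(matrix[0])) and matrices with a row shorter than row 0.
def Pre_apply_reverse_e4 (matrix : List (List String)) : Prop :=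
  matrix ≠ [] ∧ ∀ row ∈ matrix, (matrix.headD []).length ≤ row.length
instance (matrix : List (List String)) : Decidable (Pre_apply_reverse_e4 matrix) := by
  unfold Pre_apply_reverse_e4; infer_instance

def pvWitness_apply_reverse_e4 : List (List String) := [["a", "b"], ["c", "d"]]

def Spec_apply_reverse_e4 (matrix : List (List String)) (out : String) : Prop := out = apply_reverse_e4_alt matrix
instance (matrix : List (List String)) (out : String) : Decidable (Spec_apply_reverse_e4 matrix out) := by unfold Spec_apply_reverse_e4; infer_instance

-- ===== CLAIM (what is proved, stated in full; the proofs are below) =====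
def Claim_equal_apply_reverse_e4 : Prop := ∀ (matrix : List (List String)), Dom_apply_reverse_e4 matrix → Pre_apply_reverse_e4 matrix → Spec_apply_reverse_e4 matrix (apply_reverse_e4 matrix)

-- ===== LEMMAS AND PROOFS =====

def strConcat (l : List String) : String := l.foldr (· ++ ·) ""
theorem strConcat_cons (s : String) (l : List String) :
    strConcat (s :: l) = s ++ strConcat l := rfl

theorem strConcat_nil : strConcat [] = "" := rfl

theorem strConcat_append (l1 l2 : List String) :
    strConcat (l1 ++ l2) = strConcat l1 ++ strConcat l2 := by
  induction l1 with
  | nil => simp [strConcat]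
  | cons a t ih => simp [strConcat_cons, ih, String.append_assoc]

theorem toList_strConcat (parts : List String) :
    (strConcat parts).toList = (parts.map String.toList).flatten := by
  induction parts with
  | nil => rfl
  | cons a t ih => simp [strConcat_cons, ih]

theorem flatten_intersperse_nil (xss : List (List Char)) :
    (List.intersperse ([] : List Char) xss).flatten = xss.flatten := by
  induction xss with
  | nil => rfl
  | cons a t ih => cases t <;> simp_all [List.intersperse]

theorem join_empty_eq_strConcat (parts : List String) :
    PySem.Str.join "" parts = strConcat parts := by
  apply String.toList_inj.mp
  rw [PySem.Str.toList_join, toList_strConcat]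
  show List.intercalate _ _ = _
  simpa [List.intercalate] using flatten_intersperse_nil (parts.map String.toList)

def walkCells (matrix : List (List String)) (row_count : Int) (i j : Int) : List String :=
  if _h : i ≤ row_count - 1 ∧ 0 ≤ j then
    pvCellI matrix i j :: walkCells matrix row_count (i + 1) (j - 1)
  else []
termination_by (j + 1).toNat
decreasing_by omega

theorem pvWalk_eq_aux (matrix : List (List String)) (rc : Int) :
    ∀ n : Nat, ∀ i j : Int, (j + 1).toNat ≤ n → ∀ msg,
      pvWalk matrix rc i j msg = msg ++ strConcat (walkCells matrix rc i j) := by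
  intro n
  induction n with
  | zero =>
    intro i j hj msg
    rw [pvWalk, walkCells, dif_neg (by omega), dif_neg (by omega)]
    simp [strConcat]
  | succ n ih =>
    intro i j hj msg
    rw [pvWalk, walkCells]
    by_cases h : i ≤ rc - 1 ∧ 0 ≤ j
    · rw [dif_pos h, dif_pos h, ih (i + 1) (j - 1) (by omega), strConcat_cons,
        String.append_assoc]
    · rw [dif_neg h, dif_neg h]; simp [strConcat]

theorem pvWalk_eq (matrix : List (List String)) (rc i j : Int) (msg : String) :
    pvWalk matrix rc i j msg = msg ++ strConcat (walkCells matrix rc i j) :=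
  pvWalk_eq_aux matrix rc (j + 1).toNat i j le_rfl msg

theorem foldl_walk (matrix : List (List String)) (rc : Int) (l : List (Int × Int)) :
    ∀ a : String, l.foldl (fun message h => pvWalk matrix rc h.1 h.2 message) a
      = a ++ strConcat (l.map (fun h => strConcat (walkCells matrix rc h.1 h.2))) := by
  induction l with
  | nil => intro a; simp [strConcat]
  | cons h t ih =>
    intro a
    simp only [List.foldl_cons, List.map_cons, strConcat_cons]
    rw [ih, pvWalk_eq, String.append_assoc]

theorem pvCellI_natCast (matrix : List (List String)) (i j : Nat) :
    pvCellI matrix (i : Int) (j : Int) = pvCell matrix i j := by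
  simp [pvCellI, pvCell]

theorem walkCells_neg (matrix : List (List String)) (rc i : Int) :
    walkCells matrix rc i (-1) = [] := by
  rw [walkCells]; simp

theorem walkCells_closed (matrix : List (List String)) (rc : Nat) (j0 : Nat) :
    ∀ i0 : Nat, walkCells matrix (rc : Int) (i0 : Int) (j0 : Int)
      = (List.range (min (rc - i0) (j0 + 1))).map (fun t => pvCell matrix (i0 + t) (j0 - t)) := by
  induction j0 with
  | zero =>
    intro i0
    rw [walkCells]
    split_ifs with h
    · have h1 : min (rc - i0) (0 + 1) = 1 := by omega
      rw [h1]
      have e : ((0 : Nat) : Int) - 1 = -1 := by norm_num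
      rw [e, walkCells_neg]
      simp [List.range_one, pvCellI, pvCell, PySem.List.pyGetD_zero]
    · have h0 : min (rc - i0) (0 + 1) = 0 := by simp at h; omega
      rw [h0]; simp
  | succ j0 ih =>
    intro i0
    rw [walkCells]
    split_ifs with h
    · have hi : i0 < rc := by
        have := h.1
        omega
      have e1 : (i0 : Int) + 1 = ((i0 + 1 : Nat) : Int) := by push_cast; ring
      have e2 : ((j0 + 1 : Nat) : Int) - 1 = (j0 : Int) := by push_cast; ring
      rw [e1, e2, ih (i0 + 1)]
      have hm : min (rc - i0) (j0 + 1 + 1) = min (rc - (i0 + 1)) (j0 + 1) + 1 := by omega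
      rw [hm, List.range_succ_eq_map]
      simp only [List.map_cons, List.map_map]
      refine congrArg₂ List.cons ?_ ?_
      · rw [pvCellI_natCast]
        congr 1
      · apply List.map_congr_left
        intro t _
        simp only [Function.comp]
        congr 1 <;> omega
    · have h0 : min (rc - i0) (j0 + 1 + 1) = 0 := by
        simp at h
        omega
      rw [h0]; simp

def diagCells (matrix : List (List String)) (cc r s : Nat) : List String :=
  (List.range r).flatMap
    (fun i => if i ≤ s ∧ s < i + cc then [pvCell matrix i (s - i)] else [])

theorem diagCells_succ (matrix : List (List String)) (cc r s : Nat) :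
    diagCells matrix cc (r + 1) s
      = diagCells matrix cc r s
        ++ (if r ≤ s ∧ s < r + cc then [pvCell matrix r (s - r)] else []) := by
  rw [diagCells, List.range_succ, List.flatMap_append]
  simp [diagCells]

theorem diagCells_closed (matrix : List (List String)) (cc s : Nat) (hcc : 1 ≤ cc) :
    ∀ r : Nat, diagCells matrix cc r s
      = (List.range (min (r - (s + 1 - cc)) (s - (s + 1 - cc) + 1))).map
          (fun t => pvCell matrix ((s + 1 - cc) + t) (s - ((s + 1 - cc) + t))) := by
  intro r
  induction r with
  | zero => simp [diagCells]
  | succ r ih =>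
    rw [diagCells_succ, ih]
    by_cases h : r ≤ s ∧ s < r + cc
    · have hm : min ((r + 1) - (s + 1 - cc)) (s - (s + 1 - cc) + 1)
          = min (r - (s + 1 - cc)) (s - (s + 1 - cc) + 1) + 1 := by omega
      have hn : min (r - (s + 1 - cc)) (s - (s + 1 - cc) + 1) = r - (s + 1 - cc) := by omega
      rw [hm, hn, List.range_succ, List.map_append]
      simp only [if_pos h, List.map_cons, List.map_nil]
      have e1 : (s + 1 - cc) + (r - (s + 1 - cc)) = r := by omega
      rw [e1]
    · have hm : min ((r + 1) - (s + 1 - cc)) (s - (s + 1 - cc) + 1)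
          = min (r - (s + 1 - cc)) (s - (s + 1 - cc) + 1) := by
        rcases not_and_or.mp h with h1 | h1 <;> omega
      rw [hm]
      simp [if_neg h]

theorem getD_set_list (bs : List (List String)) (n : Nat) (v : List String) (s : Nat) :
    (bs.set n v).getD s [] = if s = n ∧ n < bs.length then v else bs.getD s [] := by
  simp only [List.getD_eq_getElem?_getD, List.getElem?_set]
  split_ifs with h1 h2 h3 h4 <;> simp_all

theorem inner_fold_length (matrix : List (List String)) (i : Nat)
    (bs : List (List String)) : ∀ cc : Nat,
    ((List.range cc).foldl
      (fun bs j => bs.set (i + j) (bs.getD (i + j) [] ++ [pvCell matrix i j])) bs).length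
      = bs.length := by
  intro cc
  induction cc with
  | zero => rfl
  | succ k ih =>
    rw [List.range_succ, List.foldl_append]
    simp only [List.foldl_cons, List.foldl_nil]
    rw [List.length_set, ih]

theorem inner_fold_buckets (matrix : List (List String)) (i : Nat)
    (bs : List (List String)) : ∀ cc : Nat,
    ∀ s : Nat, s < bs.length →
      ((List.range cc).foldl
        (fun bs j => bs.set (i + j) (bs.getD (i + j) [] ++ [pvCell matrix i j])) bs).getD s []
      = bs.getD s [] ++ (if i ≤ s ∧ s < i + cc then [pvCell matrix i (s - i)] else []) := by
  intro cc
  induction cc with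
  | zero => intro s hs; simp
  | succ k ih =>
    intro s hs
    rw [List.range_succ, List.foldl_append]
    simp only [List.foldl_cons, List.foldl_nil]
    rw [getD_set_list, inner_fold_length]
    by_cases h : s = i + k
    · subst h
      rw [if_pos ⟨rfl, hs⟩, ih (i + k) hs,
        if_neg (by omega : ¬ (i ≤ i + k ∧ i + k < i + k)),
        if_pos (by omega : i ≤ i + k ∧ i + k < i + (k + 1))]
      simp only [List.append_nil]
      have e : (i + k) - i = k := by omega
      rw [e]
    · rw [if_neg (fun hc => h hc.1), ih s hs]
      congr 1
      by_cases h2 : i ≤ s ∧ s < i + k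
      · rw [if_pos h2, if_pos (by omega : i ≤ s ∧ s < i + (k + 1))]
      · rw [if_neg h2, if_neg (by rcases not_and_or.mp h2 with h3 | h3 <;> omega : ¬ (i ≤ s ∧ s < i + (k + 1)))]

theorem outer_fold_length (matrix : List (List String)) (cc : Nat)
    (init : List (List String)) : ∀ r : Nat,
    ((List.range r).foldl
      (fun bs i =>
        (List.range cc).foldl
          (fun bs j => bs.set (i + j) (bs.getD (i + j) [] ++ [pvCell matrix i j])) bs)
      init).length = init.length := by
  intro r
  induction r with
  | zero => rfl
  | succ k ih =>
    rw [List.range_succ, List.foldl_append]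
    simp only [List.foldl_cons, List.foldl_nil]
    rw [inner_fold_length, ih]

theorem outer_fold_buckets (matrix : List (List String)) (cc L : Nat) :
    ∀ r : Nat, ∀ s : Nat, s < L →
      ((List.range r).foldl
        (fun bs i =>
          (List.range cc).foldl
            (fun bs j => bs.set (i + j) (bs.getD (i + j) [] ++ [pvCell matrix i j])) bs)
        (List.replicate L [])).getD s []
      = diagCells matrix cc r s := by
  intro r
  induction r with
  | zero =>
    intro s hs
    simp [diagCells, List.getD_eq_getElem?_getD, hs]
  | succ k ih =>
    intro s hs
    rw [List.range_succ, List.foldl_append]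
    simp only [List.foldl_cons, List.foldl_nil]
    rw [inner_fold_buckets matrix k _ cc s (by rw [outer_fold_length]; simpa), ih s hs,
      diagCells_succ]


theorem foldl_dedup_append (js : List Int) (hnd : js.Nodup) :
    ∀ acc : List (Int × Int), (∀ j ∈ js, ((0 : Int), j) ∉ acc) →
      js.foldl (fun a j => if ((0 : Int), j) ∈ a then a else a ++ [((0 : Int), j)]) acc
        = acc ++ js.map (fun j => ((0 : Int), j)) := by
  induction js with
  | nil => intro acc _; simp
  | cons j t ih =>
    intro acc hmem
    have hj : ((0 : Int), j) ∉ acc := hmem j (List.mem_cons_self)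
    simp only [List.foldl_cons, if_neg hj]
    rw [ih (List.Nodup.of_cons hnd) (acc ++ [((0 : Int), j)]) ?_]
    · simp
    · intro j' hj' hc
      rcases List.mem_append.mp hc with hc | hc
      · exact hmem j' (List.mem_cons_of_mem _ hj') hc
      · have : j' = j := by simpa using hc
        exact (List.nodup_cons.mp hnd).1 (this ▸ hj')

theorem heads_closed (matrix : List (List String)) (hne : matrix ≠ []) :
    get_matrix_diags matrix
      = ((List.range matrix.length).reverse.map
          (fun i : Nat => ((i : Int), ((matrix.headD []).length : Int) - 1)))
        ++ ((List.range ((matrix.headD []).length - 1)).reverse.map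
          (fun j : Nat => ((0 : Int), (j : Int)))) := by
  unfold get_matrix_diags
  simp only [PySem.List.slice?_none_none_neg_one, Option.getD_some,
    PySem.List.foldl_append_singleton_eq_map, List.nil_append]
  have hget : PySem.List.pyGetD matrix 0 ([] : List String) = matrix.headD [] := by
    cases matrix with
    | nil => simp at hne
    | cons a t => simp [PySem.List.pyGetD_zero]
  rw [hget]
  have hrcpos : 0 < matrix.length := List.length_pos_iff.mpr hne
  set cc : Nat := (matrix.headD []).length with hcc
  set rc : Nat := matrix.length with hrc
  have hr : (PySem.List.pyRange 0 (rc : Int) 1).reverse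
      = (List.range rc).reverse.map (fun k : Nat => (k : Int)) := by
    rw [PySem.List.pyRange_one, ← List.map_reverse]
    simp
  have hc : (PySem.List.pyRange 0 (cc : Int) 1).reverse
      = (List.range cc).reverse.map (fun k : Nat => (k : Int)) := by
    rw [PySem.List.pyRange_one, ← List.map_reverse]
    simp
  rw [hr, hc, List.map_map]
  have hd1 : (List.range rc).reverse.map
      ((fun i : Int => (i, (cc : Int) - 1)) ∘ (fun k : Nat => (k : Int)))
      = (List.range rc).reverse.map (fun i : Nat => ((i : Int), (cc : Int) - 1)) := rfl
  rw [hd1]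
  cases cc with
  | zero => simp
  | succ k =>
    rw [show (List.range (k + 1)).reverse = k :: (List.range k).reverse by
      rw [List.range_succ]; simp]
    simp only [List.map_cons, List.foldl_cons]
    have hmem : (((0 : Nat) : Int), (k : Int))
        ∈ (List.range rc).reverse.map (fun i : Nat => ((i : Int), ((k + 1 : Nat) : Int) - 1)) := by
      apply List.mem_map.mpr
      refine ⟨0, by simpa using hrcpos, ?_⟩
      push_cast
      ring_nf
    rw [if_pos (by simpa using hmem)]
    rw [foldl_dedup_append _ ?_ _ ?_]
    · congr 1
      simp [List.map_map, Function.comp]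
    · refine List.Nodup.map ?_ (List.nodup_reverse.mpr List.nodup_range)
      intro a b h
      simpa using h
    · intro j hj hcmem
      rcases List.mem_map.mp hj with ⟨j', hj', rfl⟩
      rcases List.mem_map.mp hcmem with ⟨i', _, hpair⟩
      have h2 : ((k + 1 : Nat) : Int) - 1 = (j' : Int) := congrArg Prod.snd hpair
      have : j' = k := by omega
      have : j' < k := by simpa using hj'
      omega

theorem strConcat_map_const_empty {α : Type} (l : List α) :
    strConcat (l.map (fun _ => "")) = "" := by
  induction l with
  | nil => rfl
  | cons a t ih => simpa [strConcat_cons] using ih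

theorem strConcat_flatten (xss : List (List String)) :
    strConcat xss.flatten = strConcat (xss.map strConcat) := by
  induction xss with
  | nil => rfl
  | cons a t ih => simp [strConcat_cons, strConcat_append, ih]

theorem main_eq (matrix : List (List String)) (hne : matrix ≠ []) :
    apply_reverse_e4 matrix = apply_reverse_e4_alt matrix := by
  have hrcpos : 0 < matrix.length := List.length_pos_iff.mpr hne
  unfold apply_reverse_e4 apply_reverse_e4_alt
  rw [heads_closed matrix hne, foldl_walk, join_empty_eq_strConcat]
  obtain ⟨cc, hcc⟩ : ∃ n, (matrix.headD []).length = n := ⟨_, rfl⟩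
  obtain ⟨rc, hrc⟩ : ∃ n, matrix.length = n := ⟨_, rfl⟩
  rw [hcc, hrc]
  rw [hrc] at hrcpos
  rw [String.empty_append, List.flatMap_def, strConcat_flatten, List.map_map,
    List.map_append, strConcat_append]
  by_cases hcc0 : cc = 0
  · subst hcc0
    simp only [Nat.zero_sub, List.range_zero, List.reverse_nil, List.map_nil,
      strConcat_nil, Nat.add_zero]
    have hA : List.map ((fun h : Int × Int => strConcat (walkCells matrix (rc : Int) h.1 h.2))
          ∘ (fun i : Nat => ((i : Int), ((0 : Nat) : Int) - 1))) (List.range rc).reverse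
        = List.map (fun _ : Nat => "") (List.range rc).reverse := by
      apply List.map_congr_left
      intro i _
      dsimp only [Function.comp]
      rw [show ((0 : Nat) : Int) - 1 = -1 by norm_num, walkCells_neg]
      rfl
    have hB : List.map (strConcat ∘ (fun s : Nat =>
          ((List.range rc).foldl (fun bs i => List.foldl
              (fun bs j => bs.set (i + j) (bs.getD (i + j) [] ++ [pvCell matrix i j])) bs
              ([] : List Nat))
            (List.replicate (rc - 1) ([] : List String))).getD s []))
          (List.range (rc - 1)).reverse
        = List.map (fun _ : Nat => "") (List.range (rc - 1)).reverse := by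
      apply List.map_congr_left
      intro s _
      dsimp only [Function.comp]
      simp only [List.foldl_nil, PySem.List.foldl_ignore]
      rw [List.getD_eq_getElem?_getD, List.getElem?_replicate]
      rcases Nat.decLt s (rc - 1) with h | h <;> simp [h] <;> rfl
    rw [List.map_map, hA, strConcat_map_const_empty, hB, strConcat_map_const_empty]
    rfl
  · have hcc1 : 1 ≤ cc := by omega
    rw [show rc + cc - 1 = (cc - 1) + rc by omega, List.range_add, List.reverse_append,
      List.map_append, strConcat_append]
    congr 1
    · -- the long diagonals: heads (i, cc-1) against buckets cc-1+i
      apply congrArg strConcat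
      simp only [← List.map_reverse, List.map_map]
      apply List.map_congr_left
      intro i hi
      have hilt : i < rc := by simpa using (List.mem_reverse.mp hi)
      dsimp only [Function.comp]
      apply congrArg strConcat
      rw [show ((cc : Int) - 1) = ((cc - 1 : Nat) : Int) by omega, walkCells_closed]
      rw [outer_fold_buckets matrix cc ((cc - 1) + rc) rc (cc - 1 + i) (by omega),
        diagCells_closed matrix cc (cc - 1 + i) hcc1 rc]
      rw [show cc - 1 + i + 1 - cc = i by omega,
        show cc - 1 + i - i + 1 = cc - 1 + 1 by omega]
      apply List.map_congr_left
      intro t _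
      congr 1
      omega
    · -- the short diagonals: heads (0, j) against buckets j
      apply congrArg strConcat
      simp only [List.map_map]
      apply List.map_congr_left
      intro j hj
      have hjlt : j < cc - 1 := by simpa using (List.mem_reverse.mp hj)
      dsimp only [Function.comp]
      apply congrArg strConcat
      rw [show ((0 : Int)) = (((0 : Nat)) : Int) by norm_num, walkCells_closed]
      rw [outer_fold_buckets matrix cc ((cc - 1) + rc) rc j (by omega),
        diagCells_closed matrix cc j hcc1 rc]
      rw [show j + 1 - cc = 0 by omega]
      apply List.map_congr_left
      intro t _
      congr 1
      omega

-- ===== VERDICT (by name: the statement is the Claim_ definition above) =====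
theorem apply_reverse_e4_spec : Claim_equal_apply_reverse_e4 := by
  intro matrix _hdom hpre
  exact main_eq matrix hpre.1
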